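-- pv_equiv track=rewrite | github.com/Aasthaengg/IBMdataset | Python_codes/p03151/s071976238.py | solve
-- ===== SOURCE A (Python) =====
-- def solve(n,a,b):
--   delta = [b[i] - a[i] for i in range(n)]
--   need = list(x for x in delta if x > 0)
--   amari = list(sorted((abs(x) for x in delta if x < 0),reverse=True))
--   needScore = sum(need)
--   if needScore > sum(amari):
--     return -1
--   k = 0
--   s = 0
--   while s < needScore:
--     s += amari[k]
--     k += 1
--   return k + len(need)
-- ===== SOURCE B (Python) =====
-- def solve(n, a, b):
--     delta = [b[i] - a[i] for i in range(n)]
--     need = [x for x in delta if x > 0]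
--     amari = sorted((-x for x in delta if x < 0), reverse=True)
--     needScore = sum(need)
--     # prefix sums of the descending surpluses
--     prefix = []
--     s = 0
--     for x in amari:
--         s += x
--         prefix.append(s)
--     if needScore > s:
--         return -1
--     if needScore == 0:
--         return len(need)
--     # binary search: smallest index with prefix[idx] >= needScore
--     lo, hi = 0, len(prefix)
--     while lo < hi:
--         mid = (lo + hi) // 2
--         if prefix[mid] >= needScore:
--             hi = mid
--         else:
--             lo = mid + 1
--     return lo + 1 + len(need)
-- ===== Notes on version B (the rewrite author's own statement) =====
-- stated objective: alternative
-- what changed: The incremental while-loop accumulation over the sorted surpluses is replaced by building a prefix-sum array once and binary-searching it for the smallest prefix covering the need.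
import Mathlib
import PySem

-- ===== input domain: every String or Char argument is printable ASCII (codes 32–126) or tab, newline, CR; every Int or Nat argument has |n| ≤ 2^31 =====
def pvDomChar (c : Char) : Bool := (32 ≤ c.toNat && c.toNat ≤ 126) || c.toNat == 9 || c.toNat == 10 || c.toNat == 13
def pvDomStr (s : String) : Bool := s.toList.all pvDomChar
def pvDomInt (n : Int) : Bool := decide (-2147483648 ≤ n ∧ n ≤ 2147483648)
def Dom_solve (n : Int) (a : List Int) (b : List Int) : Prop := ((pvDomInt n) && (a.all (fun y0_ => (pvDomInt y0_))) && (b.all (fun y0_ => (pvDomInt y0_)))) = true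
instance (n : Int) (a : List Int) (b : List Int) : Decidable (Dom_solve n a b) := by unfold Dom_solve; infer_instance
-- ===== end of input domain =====

-- B replaces A's linear accumulation over the sorted surpluses by a prefix-sum array plus a binary search (alternative decomposition, same asymptotic cost dominated by the sort).


-- ===== PORT A =====
-- while s < needScore: s += amari[k]; k += 1 — ported by consuming the list from
-- index k on; the [] case (Python's IndexError) is unreachable after the guard
-- needScore ≤ sum(amari), where the while condition has already failed.
def pvLoopA (t : Int) : List Int → Int → Int → Int
  | [], k, _ => k
  | x :: rest, k, s => if s < t then pvLoopA t rest (k + 1) (s + x) else k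

def solve (n : Int) (a : List Int) (b : List Int) : Int :=
  -- b[i] - a[i]: in range for every i by Pre_solve, so pyGetD is exact here
  let delta := (PySem.List.pyRange 0 n 1).map
    (fun i => PySem.List.pyGetD b i 0 - PySem.List.pyGetD a i 0)
  let need := delta.filter (fun x => decide (0 < x))
  let amari := PySem.List.sorted ((delta.filter (fun x => decide (x < 0))).map (fun x => |x|)) (fun x => x) true
  let needScore := need.sum
  if needScore > amari.sum then -1
  else pvLoopA needScore amari 0 0 + (need.length : Int)

-- ===== PORT B =====
-- for x in amari: s += x; prefix.append(s)
def pvBuild (amari : List Int) : List Int × Int :=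
  amari.foldl (fun acc x => (acc.1 ++ [acc.2 + x], acc.2 + x)) (([] : List Int), (0 : Int))

-- while lo < hi: mid = (lo+hi)//2; if prefix[mid] >= needScore: hi = mid else lo = mid+1
-- (mid is always in range when called with hi ≤ len, so getD is exact there)
def pvBsearch (pfx : List Int) (t : Int) (lo hi : Nat) : Nat :=
  if lo < hi then
    let mid := (lo + hi) / 2
    if t ≤ pfx.getD mid 0 then pvBsearch pfx t lo mid else pvBsearch pfx t (mid + 1) hi
  else lo
termination_by hi - lo
decreasing_by all_goals omega

def solve_alt (n : Int) (a : List Int) (b : List Int) : Int :=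
  let delta := (PySem.List.pyRange 0 n 1).map
    (fun i => PySem.List.pyGetD b i 0 - PySem.List.pyGetD a i 0)
  let need := delta.filter (fun x => decide (0 < x))
  let amari := PySem.List.sorted ((delta.filter (fun x => decide (x < 0))).map (fun x => -x)) (fun x => x) true
  let needScore := need.sum
  let ps := pvBuild amari
  if needScore > ps.2 then -1
  else if needScore = 0 then (need.length : Int)
  else (pvBsearch ps.1 needScore 0 ps.1.length : Int) + 1 + (need.length : Int)

-- ===== PRECONDITION & SPEC =====
-- Pre_solve: exactly the inputs where A's indexing b[i], a[i] for i in range(n) stays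
-- in range (otherwise the Python raises IndexError).
def Pre_solve (n : Int) (a : List Int) (b : List Int) : Prop :=
  n ≤ (a.length : Int) ∧ n ≤ (b.length : Int)
instance (n : Int) (a : List Int) (b : List Int) : Decidable (Pre_solve n a b) := by
  unfold Pre_solve; infer_instance

def pvWitness_solve : Int × List Int × List Int := (2, [3, 1], [1, 4])

def Spec_solve (n : Int) (a : List Int) (b : List Int) (out : Int) : Prop := out = solve_alt n a b
instance (n : Int) (a : List Int) (b : List Int) (out : Int) : Decidable (Spec_solve n a b out) := by
  unfold Spec_solve; infer_instance

-- ===== CLAIM (what is proved, stated in full; the proofs are below) =====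
def Claim_equal_solve : Prop := ∀ (n : Int) (a : List Int) (b : List Int), Dom_solve n a b → Pre_solve n a b → Spec_solve n a b (solve n a b)

-- ===== LEMMAS AND PROOFS =====

-- A's loop with explicit counter equals a Nat step-counter
def pvCnt (t : Int) : List Int → Int → Nat
  | [], _ => 0
  | x :: r, s => if s < t then pvCnt t r (s + x) + 1 else 0

theorem pvLoopA_eq_cnt (t : Int) : ∀ (l : List Int) (k s : Int),
    pvLoopA t l k s = k + (pvCnt t l s : Int) := by
  intro l
  induction l with
  | nil => intro k s; simp [pvLoopA, pvCnt]
  | cons x r ih =>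
    intro k s
    simp only [pvLoopA, pvCnt]
    split_ifs with h
    · rw [ih]; push_cast; ring
    · simp

theorem pvCnt_of_not_lt (t : Int) (l : List Int) (s : Int) (h : ¬ s < t) :
    pvCnt t l s = 0 := by
  cases l <;> simp [pvCnt, h]

theorem pvCnt_lt (t : Int) : ∀ (l : List Int) (s : Int) (j : Nat),
    j < pvCnt t l s → s + (l.take j).sum < t := by
  intro l
  induction l with
  | nil => intro s j h; simp [pvCnt] at h
  | cons x r ih =>
    intro s j h
    simp only [pvCnt] at h
    split_ifs at h with hst
    · cases j with
      | zero => simpa using hst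
      | succ j' =>
        have := ih (s + x) j' (by omega)
        simp only [List.take_succ_cons, List.sum_cons]
        linarith
    · omega

theorem pvCnt_achieve (t : Int) : ∀ (l : List Int) (s : Int),
    t ≤ s + l.sum → t ≤ s + (l.take (pvCnt t l s)).sum := by
  intro l
  induction l with
  | nil => intro s h; simpa using h
  | cons x r ih =>
    intro s h
    simp only [pvCnt]
    split_ifs with hst
    · have := ih (s + x) (by simp only [List.sum_cons] at h; linarith)
      simp only [List.take_succ_cons, List.sum_cons]
      linarith
    · simpa using not_lt.mp hst

-- the prefix list B builds, as a structural recursion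
def pvPfx : List Int → Int → List Int
  | [], _ => []
  | x :: r, s => (s + x) :: pvPfx r (s + x)

theorem pvBuild_foldl : ∀ (l : List Int) (acc : List Int) (s : Int),
    l.foldl (fun acc x => (acc.1 ++ [acc.2 + x], acc.2 + x)) (acc, s)
      = (acc ++ pvPfx l s, s + l.sum) := by
  intro l
  induction l with
  | nil => intro acc s; simp [pvPfx]
  | cons x r ih =>
    intro acc s
    simp only [List.foldl_cons, pvPfx, List.sum_cons]
    rw [ih]
    simp [List.append_assoc]
    ring

theorem pvBuild_eq (amari : List Int) : pvBuild amari = (pvPfx amari 0, amari.sum) := by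
  unfold pvBuild
  rw [pvBuild_foldl]
  simp

theorem pvPfx_length : ∀ (l : List Int) (s : Int), (pvPfx l s).length = l.length := by
  intro l
  induction l with
  | nil => intro s; simp [pvPfx]
  | cons x r ih => intro s; simp [pvPfx, ih]

theorem pvPfx_getD : ∀ (l : List Int) (s : Int) (i : Nat), i < l.length →
    (pvPfx l s).getD i 0 = s + (l.take (i + 1)).sum := by
  intro l
  induction l with
  | nil => intro s i h; simp at h
  | cons x r ih =>
    intro s i h
    cases i with
    | zero => simp [pvPfx]
    | succ i' =>
      simp only [pvPfx, List.getD_cons_succ, List.take_succ_cons, List.sum_cons]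
      rw [ih (s + x) i' (by simpa using h)]
      ring

theorem pvSum_take_nonneg {l : List Int} (h : ∀ x ∈ l, 0 ≤ x) (j : Nat) :
    0 ≤ (l.take j).sum :=
  List.sum_nonneg (fun x hx => h x (List.mem_of_mem_take hx))

theorem pvSum_take_mono {l : List Int} (h : ∀ x ∈ l, 0 ≤ x) :
    ∀ (i j : Nat), i ≤ j → (l.take i).sum ≤ (l.take j).sum := by
  induction l with
  | nil => intro i j _; simp
  | cons x r ih =>
    intro i j hij
    cases i with
    | zero => simpa using pvSum_take_nonneg (l := x :: r) h j
    | succ i' =>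
      cases j with
      | zero => omega
      | succ j' =>
        simp only [List.take_succ_cons, List.sum_cons]
        have := ih (fun y hy => h y (List.mem_cons_of_mem _ hy)) i' j' (by omega)
        linarith

-- binary-search invariant, by induction on a fuel bound for hi - lo
theorem pvBsearch_spec_aux (pfx : List Int) (t : Int)
    (M : ∀ i j : Nat, i ≤ j → j < pfx.length → pfx.getD i 0 ≤ pfx.getD j 0) :
    ∀ (d lo hi : Nat), hi - lo ≤ d → lo ≤ hi → hi ≤ pfx.length →
    (∀ i, i < lo → pfx.getD i 0 < t) →
    (∀ i, hi ≤ i → i < pfx.length → t ≤ pfx.getD i 0) →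
    (pvBsearch pfx t lo hi ≤ pfx.length
      ∧ (∀ i, i < pvBsearch pfx t lo hi → pfx.getD i 0 < t)
      ∧ (pvBsearch pfx t lo hi < pfx.length → t ≤ pfx.getD (pvBsearch pfx t lo hi) 0)) := by
  intro d
  induction d with
  | zero =>
    intro lo hi hd hle hlen H1 H2
    have hlohi : lo = hi := by omega
    rw [pvBsearch]
    simp only [hlohi, lt_irrefl, if_false]
    exact ⟨by omega, fun i hi' => H1 i (by omega), fun h => H2 hi (le_refl _) h⟩
  | succ d ih =>
    intro lo hi hd hle hlen H1 H2
    rw [pvBsearch]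
    by_cases hlt : lo < hi
    · simp only [hlt, if_true]
      have hmid1 : lo ≤ (lo + hi) / 2 := by omega
      have hmid2 : (lo + hi) / 2 < hi := by omega
      by_cases hge : t ≤ pfx.getD ((lo + hi) / 2) 0
      · simp only [hge, if_true]
        exact ih lo ((lo + hi) / 2) (by omega) (by omega) (by omega) H1
          (fun i hi1 hi2 => le_trans hge (M _ i hi1 hi2))
      · simp only [hge, if_false]
        refine ih ((lo + hi) / 2 + 1) hi (by omega) (by omega) hlen ?_ H2
        intro i hi'
        have : pfx.getD i 0 ≤ pfx.getD ((lo + hi) / 2) 0 :=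
          M i _ (by omega) (by omega)
        omega
    · simp only [hlt, if_false]
      have hlohi : lo = hi := by omega
      exact ⟨by omega, fun i hi' => H1 i (by omega),
        fun h => by rw [hlohi] at h ⊢; exact H2 hi (le_refl _) h⟩

-- the bridge: A's guarded loop equals B's prefix array + binary search
theorem pvCore (need amari : List Int)
    (hA : ∀ x ∈ amari, 0 ≤ x) (hneed : 0 ≤ need.sum) :
    (if need.sum > amari.sum then (-1 : Int)
      else pvLoopA need.sum amari 0 0 + (need.length : Int))
    = (if need.sum > (pvBuild amari).2 then (-1 : Int)
      else if need.sum = 0 then (need.length : Int)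
      else (pvBsearch (pvBuild amari).1 need.sum 0 (pvBuild amari).1.length : Int) + 1 + (need.length : Int)) := by
  rw [pvBuild_eq]
  set t := need.sum with ht
  by_cases hgt : t > amari.sum
  · simp [hgt]
  · simp only [hgt, if_false]
    rw [not_lt] at hgt
    by_cases h0 : t = 0
    · simp only [h0, if_true]
      rw [pvLoopA_eq_cnt, pvCnt_of_not_lt _ _ _ (by omega)]
      simp
    · simp only [h0, if_false]
      have htpos : 0 < t := lt_of_le_of_ne hneed (Ne.symm h0)
      set pfx := pvPfx amari 0 with hpfx
      have hlen : pfx.length = amari.length := pvPfx_length amari 0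
      have hget : ∀ i : Nat, i < amari.length → pfx.getD i 0 = (amari.take (i + 1)).sum := by
        intro i hi
        rw [hpfx, pvPfx_getD amari 0 i hi]; ring
      have M : ∀ i j : Nat, i ≤ j → j < pfx.length → pfx.getD i 0 ≤ pfx.getD j 0 := by
        intro i j hij hj
        rw [hlen] at hj
        rw [hget i (by omega), hget j hj]
        exact pvSum_take_mono hA (i + 1) (j + 1) (by omega)
      obtain ⟨hr1, hr2, hr3⟩ :=
        pvBsearch_spec_aux pfx t M pfx.length 0 pfx.length (by omega) (by omega) (le_refl _)
          (by omega) (by omega)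
      set r := pvBsearch pfx t 0 pfx.length with hrdef
      -- amari is nonempty
      have hanil : amari ≠ [] := by
        intro hnil
        rw [hnil] at hgt; simp at hgt; omega
      have hlpos : 0 < amari.length := List.length_pos_iff.mpr hanil
      -- r < length
      have hrlt : r < pfx.length := by
        by_contra hc
        have hr : r = pfx.length := by omega
        have h1 : pfx.getD (amari.length - 1) 0 < t := hr2 _ (by omega)
        rw [hget (amari.length - 1) (by omega)] at h1
        have : amari.take (amari.length - 1 + 1) = amari := by
          have : amari.length - 1 + 1 = amari.length := by omega
          rw [this, List.take_length]
        rw [this] at h1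
        omega
      set c := pvCnt t amari 0 with hcdef
      -- c ≥ 1
      have hc1 : 1 ≤ c := by
        by_contra hc
        have hc0 : c = 0 := by omega
        have := pvCnt_achieve t amari 0 (by omega)
        rw [← hcdef, hc0] at this
        simp at this
        omega
      -- c ≤ r + 1
      have hcle : c ≤ r + 1 := by
        by_contra hc
        have h1 : (0 : Int) + (amari.take (r + 1)).sum < t := pvCnt_lt t amari 0 (r + 1) (by omega)
        have h2 : t ≤ pfx.getD r 0 := hr3 hrlt
        rw [hget r (by omega)] at h2
        omega
      -- r + 1 ≤ c
      have hcge : r + 1 ≤ c := by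
        by_contra hc
        have hcr : c - 1 < r := by omega
        have h1 : pfx.getD (c - 1) 0 < t := hr2 _ hcr
        rw [hget (c - 1) (by omega)] at h1
        have hcc : c - 1 + 1 = c := by omega
        rw [hcc] at h1
        have h2 := pvCnt_achieve t amari 0 (by omega)
        rw [← hcdef] at h2
        omega
      have hcr : c = r + 1 := by omega
      rw [pvLoopA_eq_cnt, ← hcdef, hcr]
      push_cast
      ring

-- pointwise equality of the two amari expressions
theorem pvAmari_eq (delta : List Int) :
    (delta.filter (fun x => decide (x < 0))).map (fun x => |x|)
      = (delta.filter (fun x => decide (x < 0))).map (fun x => -x) := by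
  apply List.map_congr_left
  intro x hx
  have : x < 0 := by simpa using (List.mem_filter.mp hx).2
  exact abs_of_neg this

-- ===== VERDICT (by name: the statement is the Claim_ definition above) =====
theorem solve_spec : Claim_equal_solve := by
  intro n a b _ _
  unfold Spec_solve solve solve_alt
  dsimp only
  rw [pvAmari_eq]
  set delta := (PySem.List.pyRange 0 n 1).map
    (fun i => PySem.List.pyGetD b i 0 - PySem.List.pyGetD a i 0) with hdelta
  set need := delta.filter (fun x => decide (0 < x)) with hneed
  set amari := PySem.List.sorted ((delta.filter (fun x => decide (x < 0))).map (fun x => -x)) (fun x => x) true with hamari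
  have hA : ∀ x ∈ amari, 0 ≤ x := by
    intro x hx
    rw [hamari, PySem.List.mem_sorted] at hx
    obtain ⟨y, hy, rfl⟩ := List.mem_map.mp hx
    have : y < 0 := by simpa using (List.mem_filter.mp hy).2
    omega
  have hneedpos : 0 ≤ need.sum := by
    apply List.sum_nonneg
    intro x hx
    have : 0 < x := by simpa using (List.mem_filter.mp hx).2
    omega
  exact pvCore need amari hA hneedpos
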